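-- pv_equiv track=rewrite | github.com/flash1293/squeezed-signals | lib/encoders.py | delta_decode_timestamps
-- ===== SOURCE A (Python) =====
-- from typing import List, Tuple, Union
--
-- def delta_decode_timestamps(initial_timestamp: int, first_delta: int, double_deltas: List[int]) -> List[int]:
--     """
--     Decode double-delta encoded timestamps.
--
--     Args:
--         initial_timestamp: The first timestamp
--         first_delta: The first delta value
--         double_deltas: List of double-delta values
--
--     Returns:
--         List of decoded timestamps
--     """
--     if not double_deltas:
--         if first_delta == 0:
--             return [initial_timestamp]
--         return [initial_timestamp, initial_timestamp + first_delta]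
--
--     timestamps = [initial_timestamp, initial_timestamp + first_delta]
--     current_delta = first_delta
--
--     for double_delta in double_deltas:
--         current_delta += double_delta
--         timestamps.append(timestamps[-1] + current_delta)
--
--     return timestamps
-- ===== SOURCE B (Python) =====
-- def _cumsum(xs):
--     out = []
--     s = 0
--     for x in xs:
--         s += x
--         out.append(s)
--     return out
--
--
-- def delta_decode_timestamps(initial_timestamp, first_delta, double_deltas):
--     if not double_deltas and first_delta == 0:
--         return [initial_timestamp]
--     deltas = _cumsum([first_delta] + double_deltas)
--     return [initial_timestamp] + [initial_timestamp + c for c in _cumsum(deltas)]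
-- ===== Notes on version B (the rewrite author's own statement) =====
-- stated objective: alternative
-- what changed: Replaces A's single fused loop (running delta and running timestamp updated together) by two separate cumulative-sum passes: first materialize the reconstructed deltas as a prefix-sum of [first_delta]+double_deltas, then prefix-sum those deltas and offset by initial_timestamp.
import Mathlib
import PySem

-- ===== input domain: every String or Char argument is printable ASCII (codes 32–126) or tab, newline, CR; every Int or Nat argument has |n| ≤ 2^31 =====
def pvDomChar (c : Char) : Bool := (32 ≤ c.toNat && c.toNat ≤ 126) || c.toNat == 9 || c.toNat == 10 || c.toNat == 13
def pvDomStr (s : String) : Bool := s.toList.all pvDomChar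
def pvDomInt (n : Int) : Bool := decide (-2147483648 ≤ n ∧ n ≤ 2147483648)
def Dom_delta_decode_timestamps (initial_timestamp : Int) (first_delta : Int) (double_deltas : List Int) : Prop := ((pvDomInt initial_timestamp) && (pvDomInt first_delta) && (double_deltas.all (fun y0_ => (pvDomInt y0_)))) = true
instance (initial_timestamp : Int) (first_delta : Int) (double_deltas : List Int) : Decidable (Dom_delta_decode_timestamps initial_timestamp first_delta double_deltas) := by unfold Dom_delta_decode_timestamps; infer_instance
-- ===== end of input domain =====

-- B replaces A's fused loop by two separate cumulative-sum passes (build the delta table, then prefix-sum it); same O(n) cost, different decomposition.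
-- ===== PORT A =====
-- literal port of A: the loop keeps (timestamps, current_delta); timestamps[-1] is
-- PySem.List.pyGet? _ (-1) (the list is never empty, so .getD 0 is never the default)
def delta_decode_timestamps (initial_timestamp : Int) (first_delta : Int) (double_deltas : List Int) : List Int :=
  if double_deltas = [] then
    if first_delta = 0 then [initial_timestamp]
    else [initial_timestamp, initial_timestamp + first_delta]
  else
    (double_deltas.foldl
      (fun (st : List Int × Int) double_delta =>
        let current_delta := st.2 + double_delta
        (st.1 ++ [(PySem.List.pyGet? st.1 (-1)).getD 0 + current_delta], current_delta))
      ([initial_timestamp, initial_timestamp + first_delta], first_delta)).1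

-- ===== PORT B =====
-- literal port of Source B's _cumsum: a fold appending the running sum
def pvCumsum (xs : List Int) : List Int :=
  (xs.foldl (fun (st : List Int × Int) x => (st.1 ++ [st.2 + x], st.2 + x)) ([], 0)).1

def delta_decode_timestamps_alt (initial_timestamp : Int) (first_delta : Int) (double_deltas : List Int) : List Int :=
  if double_deltas = [] ∧ first_delta = 0 then [initial_timestamp]
  else
    let deltas := pvCumsum (first_delta :: double_deltas)
    [initial_timestamp] ++ (pvCumsum deltas).map (fun c => initial_timestamp + c)

-- ===== PRECONDITION & SPEC =====
def Spec_delta_decode_timestamps (initial_timestamp : Int) (first_delta : Int) (double_deltas : List Int) (out : List Int) : Prop := out = delta_decode_timestamps_alt initial_timestamp first_delta double_deltas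
instance (initial_timestamp : Int) (first_delta : Int) (double_deltas : List Int) (out : List Int) : Decidable (Spec_delta_decode_timestamps initial_timestamp first_delta double_deltas out) := by unfold Spec_delta_decode_timestamps; infer_instance

-- ===== CLAIM (what is proved, stated in full; the proofs are below) =====
def Claim_equal_delta_decode_timestamps : Prop := ∀ (initial_timestamp : Int) (first_delta : Int) (double_deltas : List Int), Dom_delta_decode_timestamps initial_timestamp first_delta double_deltas → Spec_delta_decode_timestamps initial_timestamp first_delta double_deltas (delta_decode_timestamps initial_timestamp first_delta double_deltas)

-- ===== LEMMAS AND PROOFS =====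

-- tail of A's loop output after a last timestamp t with current delta cd
def pvTail : List Int → Int → Int → List Int
  | [], _, _ => []
  | d :: r, t, cd => (t + (cd + d)) :: pvTail r (t + (cd + d)) (cd + d)

lemma pvCumsum_go (xs : List Int) : ∀ (acc : List Int) (s : Int),
    (xs.foldl (fun (st : List Int × Int) x => (st.1 ++ [st.2 + x], st.2 + x)) (acc, s)).1
      = acc ++ (List.scanl (· + ·) s xs).tail := by
  induction xs with
  | nil => simp
  | cons x r ih =>
      intro acc s
      simp only [List.foldl_cons, List.scanl_cons, List.tail_cons]
      rw [ih]
      rw [show List.scanl (· + ·) (s + x) r = (s + x) :: (List.scanl (· + ·) (s + x) r).tail from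
        (List.cons_head?_tail (by simp [List.head?_scanl])).symm]
      simp

lemma pvCumsum_eq (xs : List Int) :
    pvCumsum xs = (List.scanl (· + ·) 0 xs).tail := by
  simpa [pvCumsum] using pvCumsum_go xs [] 0

lemma pvKey (r : List Int) : ∀ (cd s t : Int),
    (List.scanl (· + ·) s (List.scanl (· + ·) cd r)).map (fun c => t + c)
      = (t + s) :: (t + s + cd) :: pvTail r (t + s + cd) cd := by
  induction r with
  | nil => intro cd s t; simp [pvTail]; ring
  | cons d r ih =>
      intro cd s t
      simp only [List.scanl_cons, List.map_cons]
      rw [ih (cd + d) (s + cd) t]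
      simp only [pvTail, List.cons.injEq]
      and_intros <;> first | trivial | ring

lemma pvLoopA (dd : List Int) : ∀ (ts : List Int) (cd : Int), ts ≠ [] →
    (dd.foldl
      (fun (st : List Int × Int) d =>
        let c := st.2 + d
        (st.1 ++ [(PySem.List.pyGet? st.1 (-1)).getD 0 + c], c))
      (ts, cd)).1
      = ts ++ pvTail dd ((PySem.List.pyGet? ts (-1)).getD 0) cd := by
  induction dd with
  | nil => simp [pvTail]
  | cons d r ih =>
      intro ts cd hts
      simp only [List.foldl_cons]
      rw [ih (ts ++ [(PySem.List.pyGet? ts (-1)).getD 0 + (cd + d)]) (cd + d) (by simp)]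
      have hlast : (PySem.List.pyGet? (ts ++ [(PySem.List.pyGet? ts (-1)).getD 0 + (cd + d)]) (-1)).getD 0
          = (PySem.List.pyGet? ts (-1)).getD 0 + (cd + d) := by
        rw [PySem.List.pyGet?_neg_one]
        simp
      rw [hlast]
      simp [pvTail]

-- ===== VERDICT (by name: the statement is the Claim_ definition above) =====
theorem delta_decode_timestamps_spec : Claim_equal_delta_decode_timestamps := by
  intro i f dd _
  unfold Spec_delta_decode_timestamps delta_decode_timestamps delta_decode_timestamps_alt
  cases dd with
  | nil =>
      by_cases hf : f = 0 <;> simp [hf, pvCumsum]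
  | cons d r =>
      have hA := pvLoopA (d :: r) [i, i + f] f (by simp)
      have hne : ¬ ((d :: r : List Int) = [] ∧ f = 0) := by simp
      rw [if_neg (by simp : ¬ (d :: r : List Int) = []), if_neg hne, hA]
      simp only [pvCumsum_eq, List.scanl_cons, List.tail_cons, zero_add]
      rw [pvKey r (f + d) f i]
      simp [pvTail, PySem.List.pyGet?_neg_one]
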